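-- pv_equiv track=rewrite | github.com/Teeeda112923/test | src/enrich.py | _top_n_unique
-- ===== SOURCE A (Python) =====
-- from typing import Dict, List, Tuple
--
-- def _top_n_unique(seq: List[str], n: int) -> List[str]:
--     out, seen = [], set()
--     for s in seq:
--         if not s or s in seen:
--             continue
--         seen.add(s)
--         out.append(s)
--         if len(out) >= n:
--             break
--     return out
-- ===== SOURCE B (Python) =====
-- def _top_n_unique(seq, n):
--     # sieve-style: take the head, then filter all its duplicates out of the remainder
--     out = []
--     rest = list(seq)
--     while rest and len(out) < n:
--         h = rest[0]
--         if h: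
--             out.append(h)
--         rest = [x for x in rest[1:] if x != h]
--     return out
-- ===== Notes on version B (the rewrite author's own statement) =====
-- stated objective: alternative
-- what changed: B keeps no seen-set at all: a sieve-style loop repeatedly takes the head of the remaining list, appends it if non-empty, and filters every later duplicate of that head out of the remainder, stopping once n items are collected (with the n<=0 case falling out of the loop condition).
-- intended difference: For n <= 0 with at least one non-empty string in seq, A returns a one-element list (its break test runs only after the first append), while B returns [], the intended 'top 0 or fewer' answer. — e.g. on _top_n_unique(["a", "b"], 0): A returns ["a"], B returns []
import Mathlib
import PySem

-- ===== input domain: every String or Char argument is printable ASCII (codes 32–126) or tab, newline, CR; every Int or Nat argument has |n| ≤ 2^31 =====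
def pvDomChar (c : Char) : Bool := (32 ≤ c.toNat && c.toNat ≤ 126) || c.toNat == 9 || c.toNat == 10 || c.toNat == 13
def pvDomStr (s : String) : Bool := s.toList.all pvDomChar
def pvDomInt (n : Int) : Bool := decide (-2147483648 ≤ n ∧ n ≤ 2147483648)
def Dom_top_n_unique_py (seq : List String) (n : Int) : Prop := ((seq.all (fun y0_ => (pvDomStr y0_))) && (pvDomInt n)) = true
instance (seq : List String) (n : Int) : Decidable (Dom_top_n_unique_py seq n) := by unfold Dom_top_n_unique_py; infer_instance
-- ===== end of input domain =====

-- B keeps no seen-set: a sieve-style loop takes the head, appends it if non-empty, and filters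
-- its later duplicates out of the remainder until n items are collected (alternative algorithm;
-- B intentionally returns [] for n <= 0 where A returns one element).


-- ===== PORT A =====
-- the for-loop of A: state (out, seen); 'continue' on empty/seen, 'break' when len(out) >= n
def pvALoop (n : Int) : List String → List String → PySem.Set String → List String
  | [], out, _ => out
  | s :: rest, out, seen =>
    if s = "" ∨ PySem.Set.contains seen s then pvALoop n rest out seen
    else
      let out' := out ++ [s]
      if n ≤ (out'.length : Int) then out'
      else pvALoop n rest out' (PySem.Set.add seen s)

def top_n_unique_py (seq : List String) (n : Int) : List String :=
  pvALoop n seq [] PySem.Set.empty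

-- ===== PORT B =====
-- B's while loop: state (rest, out); loop while rest nonempty and len(out) < n; take the head,
-- append it if non-empty, filter its duplicates out of the remainder
def pvBLoop (n : Int) : List String → List String → List String
  | [], out => out
  | h :: t, out =>
    if (out.length : Int) < n then
      pvBLoop n (t.filter (fun x => x != h)) (if h ≠ "" then out ++ [h] else out)
    else out
  termination_by rest _ => rest.length
  decreasing_by
    simp only [List.length_unattach]
    exact Nat.lt_succ_of_le (le_trans (List.length_filter_le _ _) (by simp))

def top_n_unique_py_alt (seq : List String) (n : Int) : List String :=
  pvBLoop n seq []

-- ===== PRECONDITION & SPEC =====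
-- For n ≤ 0 with a non-empty string present, A returns a one-element list (its break test runs only
-- after the first append), while B returns [], the intended answer when at most 0 items are requested.
def D_top_n_unique_py (seq : List String) (n : Int) : Prop := n ≤ 0 ∧ ∃ s ∈ seq, s ≠ ""
instance (seq : List String) (n : Int) : Decidable (D_top_n_unique_py seq n) := by unfold D_top_n_unique_py; infer_instance
def Spec_top_n_unique_py (seq : List String) (n : Int) (out : List String) : Prop := ¬ D_top_n_unique_py seq n → out = top_n_unique_py_alt seq n
instance (seq : List String) (n : Int) (out : List String) : Decidable (Spec_top_n_unique_py seq n out) := by unfold Spec_top_n_unique_py; infer_instance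
def pvDiffWitness_top_n_unique_py : List String × Int := (["a", "b"], 0)
def pvDiffWitnessOut_top_n_unique_py : (List String) × (List String) := (["a"], [])

-- ===== CLAIM (what is proved, stated in full; the proofs are below) =====
def Claim_unchanged_top_n_unique_py : Prop := ∀ (seq : List String) (n : Int), Dom_top_n_unique_py seq n → Spec_top_n_unique_py seq n (top_n_unique_py seq n)
def Claim_changed_top_n_unique_py : Prop := Dom_top_n_unique_py (pvDiffWitness_top_n_unique_py.1) (pvDiffWitness_top_n_unique_py.2) ∧ D_top_n_unique_py (pvDiffWitness_top_n_unique_py.1) (pvDiffWitness_top_n_unique_py.2) ∧ top_n_unique_py (pvDiffWitness_top_n_unique_py.1) (pvDiffWitness_top_n_unique_py.2) = pvDiffWitnessOut_top_n_unique_py.1 ∧ top_n_unique_py_alt (pvDiffWitness_top_n_unique_py.1) (pvDiffWitness_top_n_unique_py.2) = pvDiffWitnessOut_top_n_unique_py.2 ∧ pvDiffWitnessOut_top_n_unique_py.1 ≠ pvDiffWitnessOut_top_n_unique_py.2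
def Claim_exact_top_n_unique_py : Prop := ∀ (seq : List String) (n : Int), Dom_top_n_unique_py seq n → D_top_n_unique_py seq n → top_n_unique_py seq n ≠ top_n_unique_py_alt seq n

-- ===== LEMMAS AND PROOFS =====

-- the common skeleton: first occurrences of non-empty strings not in seen, in order
def pvSkip : List String → PySem.Set String → List String
  | [], _ => []
  | s :: rest, seen =>
    if s = "" ∨ PySem.Set.contains seen s then pvSkip rest seen
    else s :: pvSkip rest (PySem.Set.add seen s)

lemma pvSkip_cons (s : String) (rest : List String) (seen : PySem.Set String) :
    pvSkip (s :: rest) seen =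
      if s = "" ∨ PySem.Set.contains seen s then pvSkip rest seen
      else s :: pvSkip rest (PySem.Set.add seen s) := rfl

lemma pvALoop_cons (n : Int) (s : String) (rest : List String) (out : List String)
    (seen : PySem.Set String) :
    pvALoop n (s :: rest) out seen =
      if s = "" ∨ PySem.Set.contains seen s then pvALoop n rest out seen
      else if n ≤ ((out ++ [s]).length : Int) then out ++ [s]
      else pvALoop n rest (out ++ [s]) (PySem.Set.add seen s) := rfl

lemma pvBLoop_cons (n : Int) (h : String) (t : List String) (out : List String) :
    pvBLoop n (h :: t) out =
      if (out.length : Int) < n then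
        pvBLoop n (t.filter (fun x => x != h)) (if h ≠ "" then out ++ [h] else out)
      else out := by
  rw [pvBLoop]

lemma contains_add_of_ne {acc : PySem.Set String} {s t : String} (h : t ≠ s) :
    PySem.Set.contains (PySem.Set.add acc s) t = PySem.Set.contains acc t := by
  simp only [PySem.Set.add]
  split_ifs with hc
  · rfl
  · simp [PySem.Set.contains, h]

lemma contains_add_self (acc : PySem.Set String) (s : String) :
    PySem.Set.contains (PySem.Set.add acc s) s = true := by
  simp only [PySem.Set.add]
  split_ifs with hc
  · exact hc
  · simp [PySem.Set.contains]

lemma contains_add_eq (acc : PySem.Set String) (s t : String) :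
    PySem.Set.contains (PySem.Set.add acc s) t = (PySem.Set.contains acc t || t == s) := by
  by_cases hts : t = s
  · subst hts
    rw [contains_add_self]
    simp
  · rw [contains_add_of_ne hts]
    simp [hts]

lemma pvBLoop_nil (n : Int) (out : List String) : pvBLoop n [] out = out := by
  rw [pvBLoop]

-- pvSkip only looks at membership of non-empty strings
lemma pvSkip_congr (t : List String) : ∀ s1 s2 : PySem.Set String,
    (∀ x : String, x ≠ "" → PySem.Set.contains s1 x = PySem.Set.contains s2 x) →
    pvSkip t s1 = pvSkip t s2 := by
  induction t with
  | nil => intro _ _ _; rfl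
  | cons s rest ih =>
    intro s1 s2 hag
    rw [pvSkip_cons, pvSkip_cons]
    by_cases hs : s = ""
    · rw [if_pos (Or.inl hs), if_pos (Or.inl hs)]
      exact ih s1 s2 hag
    · have hc : PySem.Set.contains s1 s = PySem.Set.contains s2 s := hag s hs
      by_cases h1 : PySem.Set.contains s2 s = true
      · rw [if_pos (Or.inr (hc.trans h1)), if_pos (Or.inr h1)]
        exact ih s1 s2 hag
      · rw [if_neg (fun hor => hor.elim hs (fun h2 => h1 (hc.symm.trans h2))),
          if_neg (fun hor => hor.elim hs h1)]
        refine congrArg (s :: ·) (ih _ _ ?_)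
        intro x hx
        by_cases hxs : x = s
        · subst hxs; rw [contains_add_self, contains_add_self]
        · rw [contains_add_of_ne hxs, contains_add_of_ne hxs]; exact hag x hx

-- filtering out h from the tail = remembering h in the seen-set
lemma pvSkip_filter (t : List String) : ∀ (seen : PySem.Set String) (h : String),
    pvSkip (t.filter (fun x => x != h)) seen = pvSkip t (PySem.Set.add seen h) := by
  induction t with
  | nil => intro _ _; rfl
  | cons s rest ih =>
    intro seen h
    by_cases hsh : s = h
    · subst hsh
      rw [List.filter_cons, if_neg (by simp), ih, pvSkip_cons]
      by_cases hs : s = ""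
      · rw [if_pos (Or.inl hs)]
      · rw [if_pos (Or.inr (contains_add_self seen s))]
    · rw [List.filter_cons, if_pos (by simp [hsh]), pvSkip_cons, pvSkip_cons,
        contains_add_of_ne hsh]
      by_cases hskip : s = "" ∨ PySem.Set.contains seen s = true
      · rw [if_pos hskip, if_pos hskip, ih]
      · rw [if_neg hskip, if_neg hskip, ih]
        refine congrArg (s :: ·) (pvSkip_congr rest _ _ ?_)
        intro x _
        simp only [contains_add_eq]
        cases PySem.Set.contains seen x <;> cases (x == s) <;> cases (x == h) <;> rfl

lemma pvBLoop_stop (n : Int) (rest out : List String) (h : ¬ (out.length : Int) < n) :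
    pvBLoop n rest out = out := by
  cases rest with
  | nil => exact pvBLoop_nil n out
  | cons s t => rw [pvBLoop_cons, if_neg h]

lemma pvBLoop_eq (n : Int) : ∀ (m : Nat) (rest : List String), rest.length ≤ m →
    ∀ out : List String, (out.length : Int) < n →
    pvBLoop n rest out = out ++ (pvSkip rest PySem.Set.empty).take (n - out.length).toNat := by
  intro m
  induction m with
  | zero =>
    intro rest hm out _
    have : rest = [] := List.eq_nil_of_length_eq_zero (Nat.le_zero.mp hm)
    subst this; simp [pvBLoop_nil, pvSkip]
  | succ m ih =>
    intro rest hm out hlt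
    cases rest with
    | nil => simp [pvBLoop_nil, pvSkip]
    | cons h t =>
      rw [pvBLoop_cons, if_pos hlt, pvSkip_cons]
      have hempty : ¬ PySem.Set.contains PySem.Set.empty h = true := by
        simp [PySem.Set.contains, PySem.Set.empty]
      have hflen : (t.filter (fun x => x != h)).length ≤ m := by
        have := List.length_filter_le (fun x => x != h) t
        simp at hm; omega
      by_cases hh : h = ""
      · rw [if_pos (Or.inl hh)]
        have hskip : pvSkip (t.filter (fun x => x != h)) PySem.Set.empty = pvSkip t PySem.Set.empty := by
          rw [pvSkip_filter]
          refine pvSkip_congr t _ _ ?_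
          intro x hx
          exact contains_add_of_ne (hh ▸ hx)
        rw [if_neg (show ¬ h ≠ "" from fun hc => hc hh)]
        rw [ih _ hflen out hlt, hskip]
      · rw [if_neg (fun hor => Or.elim hor (fun e => hh e) (fun c => hempty c))]
        rw [if_pos (show h ≠ "" from hh)]
        have hk : (n - (out.length : Int)).toNat = (n - ((out.length : Int) + 1)).toNat + 1 := by
          omega
        rw [hk, List.take_succ_cons]
        have hskip : pvSkip (t.filter (fun x => x != h)) PySem.Set.empty
            = pvSkip t (PySem.Set.add PySem.Set.empty h) := pvSkip_filter t _ h
        by_cases hlt' : ((out ++ [h]).length : Int) < n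
        · rw [ih _ hflen (out ++ [h]) hlt', hskip]
          simp
        · rw [pvBLoop_stop n _ _ hlt']
          have h0 : (n - ((out.length : Int) + 1)).toNat = 0 := by
            simp at hlt'; omega
          rw [h0]
          simp

lemma pvALoop_eq (n : Int) (seq : List String) : ∀ (out : List String) (seen : PySem.Set String),
    (out.length : Int) < n →
    pvALoop n seq out seen = out ++ (pvSkip seq seen).take (n - out.length).toNat := by
  induction seq with
  | nil =>
    intro out seen _
    simp [pvALoop, pvSkip]
  | cons s rest ih =>
    intro out seen h
    rw [pvALoop_cons, pvSkip_cons]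
    by_cases hskip : s = "" ∨ PySem.Set.contains seen s = true
    · rw [if_pos hskip, if_pos hskip]
      exact ih out seen h
    · rw [if_neg hskip, if_neg hskip]
      have hlen : (((out ++ [s]).length : Nat) : Int) = (out.length : Int) + 1 := by simp
      have hk : (n - (out.length : Int)).toNat = (n - ((out.length : Int) + 1)).toNat + 1 := by
        omega
      rw [hk, List.take_succ_cons]
      by_cases hstop : n ≤ (((out ++ [s]).length : Nat) : Int)
      · rw [if_pos hstop]
        have h0 : (n - ((out.length : Int) + 1)).toNat = 0 := by
          rw [hlen] at hstop; omega
        rw [h0]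
        simp
      · rw [if_neg hstop]
        rw [ih (out ++ [s]) (PySem.Set.add seen s) (by rw [hlen] at hstop; omega)]
        rw [show ((((out ++ [s]).length : Nat)) : Int) = (out.length : Int) + 1 from hlen]
        simp

lemma pvALoop_all_empty (n : Int) (seq : List String) (h : ∀ s ∈ seq, s = "") :
    ∀ (out : List String) (seen : PySem.Set String), pvALoop n seq out seen = out := by
  induction seq with
  | nil => intro out seen; rfl
  | cons s rest ih =>
    intro out seen
    rw [pvALoop_cons, if_pos (Or.inl (h s (by simp)))]
    exact ih (fun t ht => h t (by simp [ht])) out seen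

lemma pvBLoop_all_empty_nil (n : Int) : ∀ (m : Nat) (seq : List String), seq.length ≤ m →
    (∀ s ∈ seq, s = "") → pvBLoop n seq [] = [] := by
  intro m
  induction m with
  | zero =>
    intro seq hm _
    have : seq = [] := List.eq_nil_of_length_eq_zero (Nat.le_zero.mp hm)
    subst this; exact pvBLoop_nil n []
  | succ m ih =>
    intro seq hm hall
    cases seq with
    | nil => exact pvBLoop_nil n []
    | cons h t =>
      rw [pvBLoop_cons]
      by_cases hlt : ((([] : List String).length : Nat) : Int) < n
      · rw [if_pos hlt, if_neg (show ¬ h ≠ "" from fun hc => hc (hall h (by simp)))]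
        refine ih _ ?_ ?_
        · have := List.length_filter_le (fun x => x != h) t
          simp at hm; omega
        · intro s hs
          exact hall s (by simp [List.mem_filter.mp hs |>.1])
      · rw [if_neg hlt]

lemma pvALoop_ne_nil (n : Int) (hn : n ≤ 0) (seq : List String)
    (h : ∃ s ∈ seq, s ≠ "") : pvALoop n seq [] PySem.Set.empty ≠ [] := by
  induction seq with
  | nil => rcases h with ⟨s, hs, _⟩; cases hs
  | cons s rest ih =>
    rw [pvALoop_cons]
    by_cases hs : s = ""
    · rw [if_pos (Or.inl hs)]
      apply ih
      rcases h with ⟨t, ht, htne⟩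
      rcases List.mem_cons.mp ht with h1 | h2
      · exact absurd (h1 ▸ hs) htne
      · exact ⟨t, h2, htne⟩
    · have hskip : ¬ (s = "" ∨ PySem.Set.contains PySem.Set.empty s = true) := by
        intro hor
        rcases hor with h1 | h2
        · exact hs h1
        · exact absurd h2 (by simp [PySem.Set.contains, PySem.Set.empty])
      rw [if_neg hskip]
      rw [if_pos (show n ≤ ((((([] : List String) ++ [s]).length : Nat)) : Int) by simp; omega)]
      simp

-- ===== VERDICT (by name: the statement is the Claim_ definition above) =====
theorem top_n_unique_py_spec : Claim_unchanged_top_n_unique_py := by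
  intro seq n _ hnd
  unfold top_n_unique_py top_n_unique_py_alt
  by_cases hn : n ≤ 0
  · have hall : ∀ s ∈ seq, s = "" := by
      by_contra hcon
      push Not at hcon
      exact hnd ⟨hn, hcon⟩
    rw [pvALoop_all_empty n seq hall, pvBLoop_all_empty_nil n seq.length seq le_rfl hall]
  · have hA := pvALoop_eq n seq [] PySem.Set.empty (by simp; omega)
    have hB := pvBLoop_eq n seq.length seq le_rfl [] (by simp; omega)
    rw [hA, hB]

theorem top_n_unique_py_changed : Claim_changed_top_n_unique_py := by
  unfold Claim_changed_top_n_unique_py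
  refine ⟨by decide, by decide, by decide, ?_, by decide⟩
  simp only [pvDiffWitness_top_n_unique_py, pvDiffWitnessOut_top_n_unique_py]
  unfold top_n_unique_py_alt
  exact pvBLoop_stop 0 (["a", "b"]) [] (by decide)

theorem top_n_unique_py_tight : Claim_exact_top_n_unique_py := by
  intro seq n _ hd
  rcases hd with ⟨hn, hex⟩
  unfold top_n_unique_py top_n_unique_py_alt
  rw [pvBLoop_stop n seq [] (by simp; omega)]
  exact pvALoop_ne_nil n hn seq hex
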